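-- pv_equiv track=rewrite | github.com/SoloLeveling2022/Intelli-credit-iith | backend/app/core/bank_analyzer.py | calculate_banking_conduct_score
-- ===== SOURCE A (Python) =====
-- from typing import Dict, List
--
-- def calculate_banking_conduct_score(bank_data: Dict, suspicious_patterns: List[Dict]) -> int:
--     """Calculate banking conduct score (0-100)"""
--     score = 100
--
--     # Deduct for bounces
--     bounce_count = bank_data.get("bounce_count", 0)
--     score -= bounce_count * 10
--
--     # Deduct for suspicious patterns
--     high_severity_patterns = [p for p in suspicious_patterns if p.get("severity") == "HIGH"]
--     score -= len(high_severity_patterns) * 15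
--
--     medium_severity_patterns = [p for p in suspicious_patterns if p.get("severity") == "MEDIUM"]
--     score -= len(medium_severity_patterns) * 5
--
--     # Ensure score is between 0-100
--     return max(0, min(100, score))
-- ===== SOURCE B (Python) =====
-- SEVERITY_WEIGHTS = {"HIGH": 15, "MEDIUM": 5}
--
-- def calculate_banking_conduct_score(bank_data, suspicious_patterns):
--     def go(pats, s):
--         if not pats:
--             return max(0, min(100, s))
--         return go(pats[1:], s - SEVERITY_WEIGHTS.get(pats[0].get("severity"), 0))
--     return go(suspicious_patterns, 100 - 10 * bank_data.get("bounce_count", 0))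
-- ===== Notes on version B (the rewrite author's own statement) =====
-- stated objective: alternative
-- what changed: Replaces A's two severity-filter comprehensions by a table-driven recursive descent: a weight table maps severity to penalty and a recursive helper threads the running score through the pattern list, clamping at the base case.
import Mathlib
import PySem

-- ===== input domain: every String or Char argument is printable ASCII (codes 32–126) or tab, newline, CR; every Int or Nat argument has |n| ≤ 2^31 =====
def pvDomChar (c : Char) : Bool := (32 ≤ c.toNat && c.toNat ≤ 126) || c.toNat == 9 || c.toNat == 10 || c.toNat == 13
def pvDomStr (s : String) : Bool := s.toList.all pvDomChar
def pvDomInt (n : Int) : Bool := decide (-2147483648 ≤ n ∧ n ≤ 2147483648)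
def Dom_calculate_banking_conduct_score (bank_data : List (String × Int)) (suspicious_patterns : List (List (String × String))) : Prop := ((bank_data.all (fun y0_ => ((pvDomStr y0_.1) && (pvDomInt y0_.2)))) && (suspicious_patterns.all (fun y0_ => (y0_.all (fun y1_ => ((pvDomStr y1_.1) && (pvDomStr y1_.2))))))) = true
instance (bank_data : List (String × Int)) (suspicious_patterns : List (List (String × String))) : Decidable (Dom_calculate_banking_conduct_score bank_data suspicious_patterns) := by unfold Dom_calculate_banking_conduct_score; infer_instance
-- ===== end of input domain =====

-- B replaces A's two severity-filter comprehensions by a table-driven recursive descent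
-- (a weight table + a recursive helper threading the running score, clamped at the base case); objective: alternative.

-- ===== PORT A =====
def calculate_banking_conduct_score (bank_data : List (String × Int)) (suspicious_patterns : List (List (String × String))) : Int :=
  let score : Int := 100
  let bounce_count := PySem.Dict.getD (PySem.Dict.ofList bank_data) "bounce_count" 0
  let score := score - bounce_count * 10
  let high_severity_patterns := suspicious_patterns.filter (fun p => PySem.Dict.get? (PySem.Dict.ofList p) "severity" == some "HIGH")
  let score := score - (high_severity_patterns.length : Int) * 15
  let medium_severity_patterns := suspicious_patterns.filter (fun p => PySem.Dict.get? (PySem.Dict.ofList p) "severity" == some "MEDIUM")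
  let score := score - (medium_severity_patterns.length : Int) * 5
  max 0 (min 100 score)

-- ===== PORT B =====
-- SEVERITY_WEIGHTS = {"HIGH": 15, "MEDIUM": 5}
def pvSeverityWeights : PySem.Dict String Int := PySem.Dict.ofList [("HIGH", 15), ("MEDIUM", 5)]

-- SEVERITY_WEIGHTS.get(sev, 0) where sev may be None (a None key matches no string key → default 0; exact)
def pvWeightOf (sev : Option String) : Int :=
  match sev with
  | none => 0
  | some k => PySem.Dict.getD pvSeverityWeights k 0

-- def go(pats, s): recursive helper threading the running score
def pvGo (pats : List (List (String × String))) (s : Int) : Int :=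
  match pats with
  | [] => max 0 (min 100 s)
  | p :: rest => pvGo rest (s - pvWeightOf (PySem.Dict.get? (PySem.Dict.ofList p) "severity"))

def calculate_banking_conduct_score_alt (bank_data : List (String × Int)) (suspicious_patterns : List (List (String × String))) : Int :=
  pvGo suspicious_patterns (100 - 10 * PySem.Dict.getD (PySem.Dict.ofList bank_data) "bounce_count" 0)

-- ===== PRECONDITION & SPEC =====
def Spec_calculate_banking_conduct_score (bank_data : List (String × Int)) (suspicious_patterns : List (List (String × String))) (out : Int) : Prop := out = calculate_banking_conduct_score_alt bank_data suspicious_patterns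
instance (bank_data : List (String × Int)) (suspicious_patterns : List (List (String × String))) (out : Int) : Decidable (Spec_calculate_banking_conduct_score bank_data suspicious_patterns out) := by unfold Spec_calculate_banking_conduct_score; infer_instance

-- ===== CLAIM (what is proved, stated in full; the proofs are below) =====
def Claim_equal_calculate_banking_conduct_score : Prop := ∀ (bank_data : List (String × Int)) (suspicious_patterns : List (List (String × String))), Dom_calculate_banking_conduct_score bank_data suspicious_patterns → Spec_calculate_banking_conduct_score bank_data suspicious_patterns (calculate_banking_conduct_score bank_data suspicious_patterns)

-- ===== LEMMAS AND PROOFS =====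
-- the per-pattern weight: 15 for HIGH, 5 for MEDIUM, else 0
theorem pvWeightOf_eq (sev : Option String) :
    pvWeightOf sev = (if sev == some "HIGH" then 15 else if sev == some "MEDIUM" then 5 else 0) := by
  match sev with
  | none => rfl
  | some k =>
    have hmk : pvSeverityWeights = PySem.Dict.mk [("HIGH", (15 : Int)), ("MEDIUM", 5)] := by decide
    simp only [pvWeightOf, PySem.Dict.getD, hmk, PySem.Dict.get?_mk_cons]
    by_cases h1 : ("HIGH" == k) = true
    · have : k = "HIGH" := (eq_of_beq h1).symm
      simp [h1, this]
    · by_cases h2 : ("MEDIUM" == k) = true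
      · have : k = "MEDIUM" := (eq_of_beq h2).symm
        simp [h1, this]
      · have hk1 : ¬ k = "HIGH" := fun h => h1 (by simp [h])
        have hk2 : ¬ k = "MEDIUM" := fun h => h2 (by simp [h])
        simp [h1, h2, hk1, hk2, PySem.Dict.get?]

-- the recursive descent equals the clamped closed form over filter counts
theorem pvGo_eq (l : List (List (String × String))) (s : Int) :
    pvGo l s = max 0 (min 100 (s
      - ((l.filter (fun p => PySem.Dict.get? (PySem.Dict.ofList p) "severity" == some "HIGH")).length : Int) * 15
      - ((l.filter (fun p => PySem.Dict.get? (PySem.Dict.ofList p) "severity" == some "MEDIUM")).length : Int) * 5)) := by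
  induction l generalizing s with
  | nil => simp [pvGo]
  | cons p t ih =>
    rw [pvGo, ih, List.filter_cons, List.filter_cons, pvWeightOf_eq]
    by_cases h1 : (PySem.Dict.get? (PySem.Dict.ofList p) "severity" == some "HIGH") = true
    · have h2 : (PySem.Dict.get? (PySem.Dict.ofList p) "severity" == some "MEDIUM") = false := by simp_all
      simp only [h1, h2, if_true, Bool.false_eq_true, if_false, List.length_cons]
      congr 1; push_cast; ring_nf
    · by_cases h2 : (PySem.Dict.get? (PySem.Dict.ofList p) "severity" == some "MEDIUM") = true
      · simp only [h1, h2, if_true, Bool.false_eq_true, if_false, List.length_cons]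
        congr 1; push_cast; ring_nf
      · simp only [h1, h2, Bool.false_eq_true, if_false]
        ring_nf

-- ===== VERDICT (by name: the statement is the Claim_ definition above) =====
theorem calculate_banking_conduct_score_spec : Claim_equal_calculate_banking_conduct_score := by
  intro bank_data suspicious_patterns _
  unfold Spec_calculate_banking_conduct_score calculate_banking_conduct_score calculate_banking_conduct_score_alt
  rw [pvGo_eq]
  congr 1; ring_nf
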